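-- pv_equiv track=rewrite | github.com/MichallHuNL/Smart-Charging-RL-main | deep_reinforcement_learning/smart_grid_environment/utils/plot.py | find_non_zero_intervals
-- ===== SOURCE A (Python) =====
-- def find_non_zero_intervals(row):
--     intervals = []
--     start = None
--
--     for i, val in enumerate(row):
--         if val != 0 and start is None:
--             start = i
--         elif val == 0 and start is not None:
--             intervals.append((start, i - 1))
--             start = None
--
--     if start is not None:
--         intervals.append((start, len(row) - 1))
--
--     return intervals
-- ===== SOURCE B (Python) =====
-- from itertools import groupby
--
--
-- def find_non_zero_intervals(row):
--     intervals = []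
--     idx = 0
--     for nonzero, group in groupby(row, key=lambda v: v != 0):
--         length = sum(1 for _ in group)
--         if nonzero:
--             intervals.append((idx, idx + length - 1))
--         idx += length
--     return intervals
-- ===== Notes on version B (the rewrite author's own statement) =====
-- stated objective: idiomatic
-- what changed: Replaces the explicit start/None state machine with itertools.groupby over the key v != 0: each maximal run is consumed as one group, nonzero groups emit (idx, idx+len-1), and a running index advances by each group's length.
import Mathlib
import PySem

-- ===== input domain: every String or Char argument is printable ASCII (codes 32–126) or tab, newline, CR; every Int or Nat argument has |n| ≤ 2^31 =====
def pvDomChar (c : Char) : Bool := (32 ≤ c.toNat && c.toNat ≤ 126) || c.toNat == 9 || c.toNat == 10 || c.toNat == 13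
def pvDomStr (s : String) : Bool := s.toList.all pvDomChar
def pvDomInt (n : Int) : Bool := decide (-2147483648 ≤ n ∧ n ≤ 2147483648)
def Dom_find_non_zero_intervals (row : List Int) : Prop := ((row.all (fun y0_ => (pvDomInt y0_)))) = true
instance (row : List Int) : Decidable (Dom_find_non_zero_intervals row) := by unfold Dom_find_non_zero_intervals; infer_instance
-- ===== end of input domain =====

-- B replaces A's start/None state machine with consecutive-run grouping (itertools.groupby
-- on the key v != 0), a more idiomatic decomposition of the same O(n) pass.


-- ===== PORT A =====
-- A's for-loop over enumerate(row) with state (intervals, start), as the obvious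
-- structural recursion carrying the running index i and that state.
def aGo : List Int → Int → List (Int × Int) → Option Int → (List (Int × Int)) × Option Int
  | [], _, intervals, start => (intervals, start)
  | val :: rest, i, intervals, start =>
    if val ≠ 0 ∧ start = none then
      aGo rest (i + 1) intervals (some i)
    else if val = 0 ∧ start ≠ none then
      aGo rest (i + 1) (intervals ++ [(start.getD 0, i - 1)]) none
    else
      aGo rest (i + 1) intervals start

def find_non_zero_intervals (row : List Int) : List (Int × Int) :=
  let r := aGo row 0 [] none
  match r.2 with
  | some s => r.1 ++ [(s, (row.length : Int) - 1)]
  | none => r.1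

-- ===== PORT B =====
-- B's groupby loop: each maximal run of elements sharing the key (v != 0) is one group
-- (its length = 1 + length of the takeWhile of equal-key successors); nonzero groups emit
-- (idx, idx + len - 1); idx advances by the group's length.
def altGo : List Int → Int → List (Int × Int)
  | [], _ => []
  | v :: rest, idx =>
    (if v != 0 then
       [(idx, idx + (((rest.takeWhile (fun w => (w != 0) == (v != 0))).length : Int) + 1) - 1)]
     else []) ++
    altGo (rest.dropWhile (fun w => (w != 0) == (v != 0)))
          (idx + (((rest.takeWhile (fun w => (w != 0) == (v != 0))).length : Int) + 1))
termination_by l => l.length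
decreasing_by
  have := List.length_dropWhile_le (fun w => (w != 0) == (v != 0)) rest
  simp only [List.length_cons]
  omega

def find_non_zero_intervals_alt (row : List Int) : List (Int × Int) := altGo row 0

-- ===== PRECONDITION & SPEC =====
def Spec_find_non_zero_intervals (row : List Int) (out : List (Int × Int)) : Prop := out = find_non_zero_intervals_alt row
instance (row : List Int) (out : List (Int × Int)) : Decidable (Spec_find_non_zero_intervals row out) := by unfold Spec_find_non_zero_intervals; infer_instance

-- ===== CLAIM (what is proved, stated in full; the proofs are below) =====
def Claim_equal_find_non_zero_intervals : Prop := ∀ (row : List Int), Dom_find_non_zero_intervals row → Spec_find_non_zero_intervals row (find_non_zero_intervals row)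

-- ===== LEMMAS AND PROOFS =====

-- final wrap-up of A's loop: append the trailing open interval, if any, ending at e
def pvWrap (p : (List (Int × Int)) × Option Int) (e : Int) : List (Int × Int) :=
  match p.2 with
  | some s => p.1 ++ [(s, e)]
  | none => p.1

def pvF (l : List Int) (i : Int) : List (Int × Int) :=
  pvWrap (aGo l i [] none) (i + (l.length : Int) - 1)

theorem pvWrap_cons (x : Int × Int) (l : List (Int × Int)) (st : Option Int) (e : Int) :
    pvWrap (x :: l, st) e = x :: pvWrap (l, st) e := by
  cases st <;> simp [pvWrap]

theorem altGo_nil (i : Int) : altGo [] i = [] := by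
  rw [altGo]

theorem aGo_acc (l : List Int) : ∀ (i : Int) (acc : List (Int × Int)) (st : Option Int),
    aGo l i acc st = (acc ++ (aGo l i [] st).1, (aGo l i [] st).2) := by
  induction l with
  | nil => intro i acc st; simp [aGo]
  | cons v rest ih =>
    intro i acc st
    simp only [aGo]
    split_ifs with h1 h2
    · rw [ih (i+1) acc (some i)]
    · rw [ih (i+1) (acc ++ [(st.getD 0, i-1)]) none, ih (i+1) ([] ++ [(st.getD 0, i-1)]) none]
      simp
    · rw [ih (i+1) acc st]

theorem aGo_skip_nonzero (p : List Int) : ∀ (r : List Int) (j s : Int),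
    (∀ x ∈ p, x ≠ 0) →
    aGo (p ++ r) j [] (some s) = aGo r (j + (p.length : Int)) [] (some s) := by
  induction p with
  | nil => intro r j s _; simp
  | cons x t ih =>
    intro r j s hp
    have hx : x ≠ 0 := hp x (by simp)
    have h0 : aGo ((x :: t) ++ r) j [] (some s) = aGo (t ++ r) (j + 1) [] (some s) := by
      simp [aGo, hx]
    rw [h0, ih r (j + 1) s (fun y hy => hp y (by simp [hy]))]
    congr 1
    simp only [List.length_cons]
    push_cast
    ring

theorem altGo_zero (rest : List Int) (i : Int) :
    altGo (0 :: rest) i = altGo rest (i + 1) := by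
  rw [altGo]
  cases rest with
  | nil => simp [altGo_nil]
  | cons w t =>
    by_cases hw : w = 0
    · subst hw
      conv_rhs => rw [altGo]
      simp only [List.takeWhile_cons, List.dropWhile_cons, bne_self_eq_false,
        Bool.false_eq_true, if_false, beq_self_eq_true, if_true, List.length_cons,
        List.nil_append]
      congr 1
      push_cast
      ring
    · simp only [List.takeWhile_cons, List.dropWhile_cons, bne_self_eq_false]
      simp only [show ((w != 0) == false) = false by simp [bne, hw]]
      simp only [Bool.false_eq_true, if_false, List.length_nil, List.nil_append]
      norm_num

theorem pvF_eq_altGo (n : Nat) : ∀ (l : List Int), l.length ≤ n → ∀ (i : Int), pvF l i = altGo l i := by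
  induction n with
  | zero =>
    intro l hl i
    have : l = [] := List.length_eq_zero_iff.mp (Nat.le_zero.mp hl)
    subst this
    simp [pvF, aGo, pvWrap, altGo_nil]
  | succ m ih =>
    intro l hl i
    cases l with
    | nil => simp [pvF, aGo, pvWrap, altGo_nil]
    | cons v rest =>
      by_cases hv : v = 0
      · -- zero head: A's loop just advances; B peels the zero
        subst hv
        have h1 : aGo (0 :: rest) i [] none = aGo rest (i + 1) [] none := by
          simp [aGo]
        have h2 : pvF (0 :: rest) i = pvF rest (i + 1) := by
          simp only [pvF, h1, List.length_cons]
          congr 1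
          push_cast
          ring
        rw [h2, altGo_zero]
        exact ih rest (by simpa using Nat.le_of_succ_le_succ hl) (i + 1)
      · -- nonzero head: A sets start := i, skips the nonzero run
        have hkey : (v != 0) = true := by simp [bne, hv]
        set run := rest.takeWhile (fun w => (w != 0) == true) with hrun
        set rest' := rest.dropWhile (fun w => (w != 0) == true) with hrest'
        have hrw : rest = run ++ rest' := (List.takeWhile_append_dropWhile).symm
        have hnz : ∀ x ∈ run, x ≠ 0 := by
          intro x hx
          have := List.mem_takeWhile_imp (hrun ▸ hx)
          simpa using this
        have hstep : aGo (v :: rest) i [] none = aGo rest' (i + 1 + (run.length : Int)) [] (some i) := by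
          have h0 : aGo (v :: rest) i [] none = aGo rest (i + 1) [] (some i) := by
            simp [aGo, hv]
          rw [h0]
          conv_lhs => rw [hrw]
          exact aGo_skip_nonzero run rest' (i + 1) i hnz
        have haltB : altGo (v :: rest) i
            = (i, i + ((run.length : Int) + 1) - 1) :: altGo rest' (i + ((run.length : Int) + 1)) := by
          conv_lhs => rw [altGo]
          simp only [hkey, if_true, ← hrun, ← hrest']
          simp
        cases hre : rest' with
        | nil =>
          -- entire tail is the nonzero run: A's final append fires
          have hlen : rest.length = run.length := by
            conv_lhs => rw [hrw, hre]
            simp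
          rw [haltB, hre, altGo_nil]
          unfold pvF
          rw [hstep, hre]
          simp only [aGo, pvWrap, List.length_cons, hlen, List.nil_append]
          have e1 : i + ((run.length + 1 : Nat) : Int) - 1 = i + ((run.length : Int) + 1) - 1 := by
            push_cast
            ring
          rw [e1]
        | cons z t =>
          have hz : z = 0 := by
            have hhd := List.head?_dropWhile_not (fun w => (w != 0) == true) rest
            rw [← hrest', hre] at hhd
            simpa using hhd
          subst hz
          have hA2 : aGo (0 :: t) (i + 1 + (run.length : Int)) [] (some i)
              = ((i, i + 1 + (run.length : Int) - 1) :: (aGo t (i + 1 + (run.length : Int) + 1) [] none).1,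
                 (aGo t (i + 1 + (run.length : Int) + 1) [] none).2) := by
            have h0 : aGo (0 :: t) (i + 1 + (run.length : Int)) [] (some i)
                = aGo t (i + 1 + (run.length : Int) + 1) [(i, i + 1 + (run.length : Int) - 1)] none := by
              simp [aGo]
            rw [h0, aGo_acc]
            simp
          have hlen : rest.length = run.length + 1 + t.length := by
            conv_lhs => rw [hrw, hre]
            simp
            omega
          have hFexp : pvF (v :: rest) i
              = (i, i + 1 + (run.length : Int) - 1) :: pvF t (i + 1 + (run.length : Int) + 1) := by
            unfold pvF
            rw [hstep, hre, hA2]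
            rw [pvWrap_cons]
            congr 1
            · simp only [List.length_cons, hlen]
              congr 1
              push_cast
              ring
          have ht : t.length ≤ m := by
            simp only [List.length_cons, hlen] at hl
            omega
          have e1 : i + 1 + (run.length : Int) - 1 = i + ((run.length : Int) + 1) - 1 := by ring
          have e2 : i + 1 + (run.length : Int) + 1 = i + ((run.length : Int) + 1) + 1 := by ring
          rw [hFexp, ih t ht (i + 1 + (run.length : Int) + 1), e1, e2, haltB, hre, altGo_zero]

-- ===== VERDICT (by name: the statement is the Claim_ definition above) =====
theorem find_non_zero_intervals_spec : Claim_equal_find_non_zero_intervals := by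
  intro row _
  unfold Spec_find_non_zero_intervals find_non_zero_intervals find_non_zero_intervals_alt
  rw [← pvF_eq_altGo row.length row le_rfl 0]
  unfold pvF pvWrap
  cases h2 : (aGo row 0 [] none).2 <;> simp [h2]
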